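-- pv_equiv track=rewrite | github.com/vivekjoshy/openskill.py | openskill/models/common.py | _rank_data
-- ===== SOURCE A (Python) =====
-- from typing import Any, List, Union
--
-- def _arg_sort(vector: List[Any]) -> List[int]:
--     """
--     Returns the indices that would sort a vector.
--
--     :param vector: A list of objects.
--     :return: Rank vector without ties.
--     """
--     return [i for (v, i) in sorted((v, i) for (i, v) in enumerate(vector))]
--
-- def _rank_data(vector: List[Any]) -> List[int]:
--     """
--     Sorting with 'competition ranking'. Pure python equivalent of
--     :code:`scipy.stats.rankdata` function.
--
--     :param vector: A list of objects.
--     :return: Rank vector with ties.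
--     """
--     vector_length = len(vector)
--     arg_sort_rank_vector = _arg_sort(vector)
--     arg_sorted_vector = [vector[rank] for rank in arg_sort_rank_vector]
--     sum_ranks = 0
--     duplicate_count = 0
--     rank_vector_with_ties = [0] * vector_length
--     for index in range(vector_length):
--         sum_ranks += index
--         duplicate_count += 1
--         if (
--             index == vector_length - 1
--             or arg_sorted_vector[index] != arg_sorted_vector[index + 1]
--         ):
--             for j in range(index - duplicate_count + 1, index + 1):
--                 rank_vector_with_ties[arg_sort_rank_vector[j]] = (
--                     index + 1 - duplicate_count + 1
--                 )
--             sum_ranks = 0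
--             duplicate_count = 0
--     return rank_vector_with_ties
-- ===== SOURCE B (Python) =====
-- from typing import Any, List
--
-- def _rank_data(vector: List[Any]) -> List[int]:
--     """Competition ranking: each element's rank is 1 + number of strictly smaller elements."""
--     return [1 + sum(1 for u in vector if u < v) for v in vector]
-- ===== Notes on version B (the rewrite author's own statement) =====
-- stated objective: simpler
-- what changed: Replaces argsort + sorted-pass tie-run bookkeeping with a one-line closed form: rank(v) = 1 + count of elements strictly smaller than v.
import Mathlib
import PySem

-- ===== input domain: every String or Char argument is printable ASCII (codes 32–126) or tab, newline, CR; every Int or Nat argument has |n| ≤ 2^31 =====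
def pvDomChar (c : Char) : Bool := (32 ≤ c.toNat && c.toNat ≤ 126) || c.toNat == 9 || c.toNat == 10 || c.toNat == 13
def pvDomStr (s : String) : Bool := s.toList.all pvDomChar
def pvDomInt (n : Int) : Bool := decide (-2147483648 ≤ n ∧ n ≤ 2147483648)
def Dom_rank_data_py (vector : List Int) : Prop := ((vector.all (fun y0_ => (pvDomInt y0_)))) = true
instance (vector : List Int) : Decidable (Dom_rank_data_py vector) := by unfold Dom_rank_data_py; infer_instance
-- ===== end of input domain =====

-- B replaces A's argsort + sorted-pass tie-run bookkeeping by the closed form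
-- rank(v) = 1 + (number of elements strictly smaller than v); objective: simpler.

-- ===== PORT A =====
-- _arg_sort: Python sorts the (v, i) tuples lexicographically → PySem.List.sorted2 with fst/snd keys.
def arg_sort_py (vector : List Int) : List Int :=
  (PySem.List.sorted2 ((PySem.List.enumerate vector).map (fun iv => (iv.2, iv.1)))
      (fun p => p.1) (fun p => p.2)).map (fun p => p.2)

-- Literal port of _rank_data.  Every list index used here is in range (indices come from
-- enumerate, loop indices stay below len), so the total pyGetD/pySetD forms (default 0) are exact.
def rank_data_py (vector : List Int) : List Int :=
  let vector_length : Int := vector.length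
  let arg_sort_rank_vector := arg_sort_py vector
  let arg_sorted_vector := arg_sort_rank_vector.map (fun r => PySem.List.pyGetD vector r 0)
  let st := (PySem.List.pyRange 0 vector_length).foldl
    (fun st index =>
      let sum_ranks := st.1 + index
      let duplicate_count := st.2.1 + 1
      let rank_vector_with_ties := st.2.2
      if index == vector_length - 1
          || !(PySem.List.pyGetD arg_sorted_vector index 0
                == PySem.List.pyGetD arg_sorted_vector (index + 1) 0) then
        let rv' := (PySem.List.pyRange (index - duplicate_count + 1) (index + 1)).foldl
          (fun rv j =>
            PySem.List.pySetD rv (PySem.List.pyGetD arg_sort_rank_vector j 0)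
              (index + 1 - duplicate_count + 1)) rank_vector_with_ties
        ((0 : Int), (0 : Int), rv')
      else (sum_ranks, duplicate_count, rank_vector_with_ties))
    ((0 : Int), (0 : Int), List.replicate vector.length (0 : Int))
  st.2.2

-- ===== PORT B =====
-- rank(v) = 1 + sum(1 for u in vector if u < v)  (the count of strictly smaller elements)
def rank_data_py_alt (vector : List Int) : List Int :=
  vector.map (fun v => 1 + (vector.countP (fun u => decide (u < v)) : Int))

-- ===== PRECONDITION & SPEC =====
def Spec_rank_data_py (vector : List Int) (out : List Int) : Prop := out = rank_data_py_alt vector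
instance (vector : List Int) (out : List Int) : Decidable (Spec_rank_data_py vector out) := by unfold Spec_rank_data_py; infer_instance

-- ===== CLAIM (what is proved, stated in full; the proofs are below) =====
def Claim_equal_rank_data_py : Prop := ∀ (vector : List Int), Dom_rank_data_py vector → Spec_rank_data_py vector (rank_data_py vector)

-- ===== LEMMAS AND PROOFS =====

-- The pair list sorted by A, and positional accessors into it.
def pvPairs (vec : List Int) : List (Int × Int) :=
  (PySem.List.enumerate vec).map (fun iv => (iv.2, iv.1))
def pvS (vec : List Int) : List (Int × Int) :=
  PySem.List.sorted (pvPairs vec) (fun p => toLex p)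
def pvV (s : List (Int × Int)) (m : Nat) : Int := (s.getD m (0, 0)).1
def pvI (s : List (Int × Int)) (m : Nat) : Int := (s.getD m (0, 0)).2
-- run start of position m = number of strictly smaller values
def pvR (s : List (Int × Int)) (m : Nat) : Nat := s.countP (fun p => decide (p.1 < pvV s m))
-- run start of the loop position k (k = length only at the very end)
def pvB (s : List (Int × Int)) (k : Nat) : Nat := if k = s.length then s.length else pvR s k
def pvW (s : List (Int × Int)) (rv : List Int) (j : Nat) : List Int :=
  rv.set (pvI s j).toNat ((pvR s j : Int) + 1)
def pvRV (s : List (Int × Int)) (n m : Nat) : List Int :=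
  (List.range m).foldl (pvW s) (List.replicate n 0)

-- Python sorts tuples lexicographically: sorted2 with fst/snd keys is sorted with the Lex key.
lemma sorted2_eq_sorted_lex (xs : List (Int × Int)) :
    PySem.List.sorted2 xs (fun p => p.1) (fun p => p.2)
      = PySem.List.sorted xs (fun p => toLex p) := by
  show List.foldl (fun acc x => PySem.List.insertBy
        (fun a b => decide (a.1 < b.1) || (!decide (b.1 < a.1) && decide (a.2 < b.2))) x acc) [] xs
      = List.foldl (fun acc x => PySem.List.insertBy
        (fun a b => decide (toLex a < toLex b)) x acc) [] xs
  have hbe : (fun (a b : Int × Int) => decide (a.1 < b.1) || (!decide (b.1 < a.1) && decide (a.2 < b.2)))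
      = (fun (a b : Int × Int) => decide (toLex a < toLex b)) := by
    funext a b
    rcases lt_trichotomy a.1 b.1 with h | h | h
    · simp [Prod.Lex.toLex_lt_toLex, h]
    · simp [Prod.Lex.toLex_lt_toLex, h]
    · simp [Prod.Lex.toLex_lt_toLex, h, asymm h, ne_of_gt h]
  rw [hbe]

lemma pvV_getElem (s : List (Int × Int)) {m : Nat} (h : m < s.length) : pvV s m = s[m].1 := by
  simp [pvV, List.getD_eq_getElem?_getD, List.getElem?_eq_getElem h]

lemma pvI_getElem (s : List (Int × Int)) {m : Nat} (h : m < s.length) : pvI s m = s[m].2 := by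
  simp [pvI, List.getD_eq_getElem?_getD, List.getElem?_eq_getElem h]

lemma pvV_le (s : List (Int × Int)) (hm : s.Pairwise (fun a b => a.1 ≤ b.1))
    {m m' : Nat} (h : m ≤ m') (h' : m' < s.length) : pvV s m ≤ pvV s m' := by
  rcases Nat.eq_or_lt_of_le h with rfl | hlt
  · exact le_refl _
  · rw [pvV_getElem s (lt_trans hlt h'), pvV_getElem s h']
    exact List.pairwise_iff_getElem.mp hm m m' (lt_trans hlt h') h' hlt

lemma pvR_congr (s : List (Int × Int)) {m j : Nat} (h : pvV s m = pvV s j) : pvR s m = pvR s j := by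
  unfold pvR; rw [h]

lemma countP_split (s : List (Int × Int)) (p : Int × Int → Bool) (m : Nat) :
    s.countP p = (s.take m).countP p + (s.drop m).countP p := by
  rw [← List.countP_append, List.take_append_drop]

lemma pvR_le (s : List (Int × Int)) (hm : s.Pairwise (fun a b => a.1 ≤ b.1))
    {m : Nat} (hmn : m < s.length) : pvR s m ≤ m := by
  unfold pvR
  rw [countP_split s _ m]
  have h2 : (s.drop m).countP (fun p => decide (p.1 < pvV s m)) = 0 := by
    rw [List.countP_eq_zero]
    intro q hq
    obtain ⟨k, hk, rfl⟩ := List.mem_iff_getElem.mp hq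
    have hk' : m + k < s.length := by
      have := hk; simp [List.length_drop] at this; omega
    rw [List.getElem_drop]
    have : pvV s m ≤ pvV s (m + k) := pvV_le s hm (Nat.le_add_right m k) hk'
    rw [pvV_getElem s hk'] at this
    simpa using not_lt.mpr this
  rw [h2, Nat.add_zero]
  calc (s.take m).countP _ ≤ (s.take m).length := List.countP_le_length
    _ ≤ m := by simp

lemma pvR_run (s : List (Int × Int)) (hm : s.Pairwise (fun a b => a.1 ≤ b.1))
    {m j : Nat} (h1 : pvR s j ≤ m) (h2 : m ≤ j) (h3 : j < s.length) : pvV s m = pvV s j := by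
  have hmn : m < s.length := Nat.lt_of_le_of_lt h2 h3
  have hle := pvV_le s hm h2 h3
  by_contra hne
  have hlt : pvV s m < pvV s j := lt_of_le_of_ne hle hne
  have hcnt : m + 1 ≤ pvR s j := by
    unfold pvR
    rw [countP_split s _ (m + 1)]
    have h1' : (s.take (m + 1)).countP (fun p => decide (p.1 < pvV s j)) = (s.take (m + 1)).length := by
      rw [List.countP_eq_length]
      intro q hq
      obtain ⟨k, hk, rfl⟩ := List.mem_iff_getElem.mp hq
      have hk' : k < s.length := by
        have := hk; simp at this; omega
      have hkm : k ≤ m := by have := hk; simp at this; omega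
      rw [List.getElem_take]
      have : pvV s k ≤ pvV s m := pvV_le s hm hkm hmn
      rw [pvV_getElem s hk'] at this
      simpa using lt_of_le_of_lt this hlt
    rw [h1']
    have : (s.take (m + 1)).length = m + 1 := by simp; omega
    omega
  omega

lemma pvR_boundary (s : List (Int × Int)) (hm : s.Pairwise (fun a b => a.1 ≤ b.1))
    {j : Nat} (h : j + 1 < s.length) (hne : pvV s j ≠ pvV s (j + 1)) : pvR s (j + 1) = j + 1 := by
  have hjlt : j < s.length := by omega
  have hstep : pvV s j < pvV s (j + 1) :=
    lt_of_le_of_ne (pvV_le s hm (Nat.le_succ j) h) hne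
  unfold pvR
  rw [countP_split s _ (j + 1)]
  have h1 : (s.take (j + 1)).countP (fun p => decide (p.1 < pvV s (j + 1))) = (s.take (j + 1)).length := by
    rw [List.countP_eq_length]
    intro q hq
    obtain ⟨k, hk, rfl⟩ := List.mem_iff_getElem.mp hq
    have hk' : k < s.length := by have := hk; simp at this; omega
    have hkj : k ≤ j := by have := hk; simp at this; omega
    rw [List.getElem_take]
    have h5 : pvV s k ≤ pvV s j := pvV_le s hm hkj hjlt
    rw [pvV_getElem s hk'] at h5
    simpa using lt_of_le_of_lt h5 hstep
  have h2 : (s.drop (j + 1)).countP (fun p => decide (p.1 < pvV s (j + 1))) = 0 := by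
    rw [List.countP_eq_zero]
    intro q hq
    obtain ⟨k, hk, rfl⟩ := List.mem_iff_getElem.mp hq
    have hk' : j + 1 + k < s.length := by have := hk; simp [List.length_drop] at this; omega
    rw [List.getElem_drop]
    have h6 : pvV s (j + 1) ≤ pvV s (j + 1 + k) := pvV_le s hm (Nat.le_add_right _ _) hk'
    rw [pvV_getElem s hk'] at h6
    simpa using not_lt.mpr h6
  rw [h1, h2]
  simp; omega

lemma pvR_zero (s : List (Int × Int)) (hm : s.Pairwise (fun a b => a.1 ≤ b.1)) :
    pvR s 0 = 0 := by
  unfold pvR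
  rw [List.countP_eq_zero]
  intro q hq
  obtain ⟨k, hk, rfl⟩ := List.mem_iff_getElem.mp hq
  have h6 : pvV s 0 ≤ pvV s k := pvV_le s hm (Nat.zero_le k) hk
  rw [pvV_getElem s hk] at h6
  simpa using not_lt.mpr h6

lemma pvS_length (vec : List Int) : (pvS vec).length = vec.length := by
  simp [pvS, pvPairs, PySem.List.length_sorted, PySem.List.length_enumerate]

lemma pvPairs_mem (vec : List Int) {p : Int × Int} (hp : p ∈ pvPairs vec) :
    ∃ k, ∃ h : k < vec.length, p = (vec[k], (k : Int)) := by
  simp only [pvPairs, List.mem_map] at hp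
  obtain ⟨iv, hiv, rfl⟩ := hp
  rw [PySem.List.mem_enumerate_iff] at hiv
  obtain ⟨k, hk, rfl⟩ := hiv
  exact ⟨k, hk, by simp⟩

lemma pvS_mem (vec : List Int) {p : Int × Int} (hp : p ∈ pvS vec) :
    ∃ k, ∃ h : k < vec.length, p = (vec[k], (k : Int)) := by
  exact pvPairs_mem vec ((PySem.List.sorted_perm _ _ _).mem_iff.mp hp)

lemma pvS_mono (vec : List Int) : (pvS vec).Pairwise (fun a b => a.1 ≤ b.1) := by
  have h := PySem.List.sorted_pairwise (pvPairs vec) (fun p : Int × Int => toLex p)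
  refine h.imp ?_
  intro a b hab
  rcases Prod.Lex.toLex_le_toLex.mp hab with h1 | h1
  · exact le_of_lt h1
  · exact le_of_eq h1.1

lemma pvS_snd_perm (vec : List Int) :
    ((pvS vec).map (fun p => p.2)).Perm ((List.range vec.length).map (fun k : Nat => (k : Int))) := by
  have hperm := (PySem.List.sorted_perm (pvPairs vec) (fun p : Int × Int => toLex p) false).map (fun p => p.2)
  have heq : (pvPairs vec).map (fun p => p.2) = (List.range vec.length).map (fun k : Nat => (k : Int)) := by
    simp only [pvPairs, List.map_map]
    have : ((fun p : Int × Int => p.2) ∘ fun iv : Int × Int => (iv.2, iv.1)) = fun p : Int × Int => p.1 := rfl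
    rw [this]
    rw [PySem.List.map_fst_enumerate]
    rw [show ((0 : Int) + (vec.length : Int)) = ((vec.length : Nat) : Int) by omega]
    exact PySem.List.pyRange_zero_natCast vec.length
  rw [heq] at hperm
  exact hperm

lemma pvS_snd_nodup (vec : List Int) : ((pvS vec).map (fun p => p.2)).Nodup := by
  refine (pvS_snd_perm vec).nodup_iff.mpr ?_
  exact (List.nodup_range).map (fun a b => by omega)

lemma pvS_fst_perm (vec : List Int) : ((pvS vec).map (fun p => p.1)).Perm vec := by
  have hperm := (PySem.List.sorted_perm (pvPairs vec) (fun p : Int × Int => toLex p) false).map (fun p => p.1)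
  have heq : (pvPairs vec).map (fun p => p.1) = vec := by
    simp only [pvPairs, List.map_map]
    have : ((fun p : Int × Int => p.1) ∘ fun iv : Int × Int => (iv.2, iv.1)) = fun p : Int × Int => p.2 := rfl
    rw [this]
    exact PySem.List.map_snd_enumerate vec 0
  rw [heq] at hperm
  exact hperm

lemma pvI_range (vec : List Int) {k : Nat} (hk : k < vec.length) :
    0 ≤ pvI (pvS vec) k ∧ (pvI (pvS vec) k).toNat < vec.length
      ∧ pvV (pvS vec) k = vec.getD (pvI (pvS vec) k).toNat 0 := by
  have hk' : k < (pvS vec).length := by rw [pvS_length]; exact hk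
  obtain ⟨i, hi, hp⟩ := pvS_mem vec (List.getElem_mem hk')
  rw [pvI_getElem _ hk', pvV_getElem _ hk', hp]
  refine ⟨by simp, by simp; exact hi, ?_⟩
  simp [List.getD_eq_getElem?_getD, List.getElem?_eq_getElem hi]

lemma arg_sort_eq (vec : List Int) : arg_sort_py vec = (pvS vec).map (fun p => p.2) := by
  unfold arg_sort_py pvS pvPairs
  rw [sorted2_eq_sorted_lex]

lemma asv_eq (vec : List Int) :
    (arg_sort_py vec).map (fun r => PySem.List.pyGetD vec r 0) = (pvS vec).map (fun p => p.1) := by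
  rw [arg_sort_eq, List.map_map]
  refine List.map_congr_left ?_
  intro p hp
  obtain ⟨k, hk, rfl⟩ := pvS_mem vec hp
  simp [PySem.List.pyGetD_natCast, List.getD_eq_getElem?_getD, List.getElem?_eq_getElem hk]

lemma asv_getD (vec : List Int) {k : Nat} (hk : k < vec.length) :
    PySem.List.pyGetD ((arg_sort_py vec).map (fun r => PySem.List.pyGetD vec r 0)) (k : Int) 0
      = pvV (pvS vec) k := by
  have hk' : k < (pvS vec).length := by rw [pvS_length]; exact hk
  rw [asv_eq, PySem.List.pyGetD_natCast, pvV_getElem _ hk']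
  simp [List.getD_eq_getElem?_getD, hk']

lemma asr_getD (vec : List Int) {k : Nat} (hk : k < vec.length) :
    PySem.List.pyGetD (arg_sort_py vec) (k : Int) 0 = pvI (pvS vec) k := by
  have hk' : k < (pvS vec).length := by rw [pvS_length]; exact hk
  rw [arg_sort_eq, PySem.List.pyGetD_natCast, pvI_getElem _ hk']
  simp [List.getD_eq_getElem?_getD, hk']

lemma pyRange_natCast (a b : Nat) :
    PySem.List.pyRange (a : Int) (b : Int) = (List.range' a (b - a)).map (fun m : Nat => (m : Int)) := by
  apply List.ext_getElem
  · simp [PySem.List.length_pyRange_one]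
  · intro i h1 h2
    rw [PySem.List.getElem_pyRange_one]
    simp only [List.getElem_map, List.getElem_range']
    omega

-- the inner write loop of A fills one whole run with its run-start rank
lemma range_split (a c : Nat) : List.range (a + c) = List.range a ++ List.range' a c := by
  rw [List.range_add, List.range'_eq_map_range]

lemma inner_eq (vec : List Int) {a k : Nat} (ha : a ≤ k) (hk : k < vec.length)
    (hrun : ∀ j, a ≤ j → j ≤ k → pvR (pvS vec) j = a) :
    (PySem.List.pyRange (a : Int) ((k : Int) + 1)).foldl
        (fun rv j => PySem.List.pySetD rv (PySem.List.pyGetD (arg_sort_py vec) j 0) ((a : Int) + 1))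
        (pvRV (pvS vec) vec.length a)
      = pvRV (pvS vec) vec.length (k + 1) := by
  have hkn : ((k : Int) + 1) = (((k + 1 : Nat)) : Int) := by push_cast; ring
  rw [hkn, pyRange_natCast a (k + 1), List.foldl_map]
  conv_rhs => rw [show k + 1 = a + (k + 1 - a) from by omega]
  unfold pvRV
  rw [range_split, List.foldl_append]
  apply PySem.List.foldl_congr_mem
  intro acc j hj
  rw [List.mem_range'_1] at hj
  have hjk : j < vec.length := by omega
  rw [asr_getD vec hjk]
  obtain ⟨hnn, -, -⟩ := pvI_range vec hjk
  rw [PySem.List.pySetD_of_nonneg _ _ hnn]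
  unfold pvW
  rw [hrun j hj.1 (by omega)]

-- the outer loop invariant: after k steps, duplicate_count = k - (run start of k) and the
-- rank vector holds the final ranks for all positions of completed runs
lemma outer_inv (vec : List Int) (k : Nat) (hk : k ≤ vec.length) :
    ((List.range k).foldl
        (fun st (kk : Nat) =>
          (fun (st : Int × Int × List Int) (index : Int) =>
            let sum_ranks := st.1 + index
            let duplicate_count := st.2.1 + 1
            let rank_vector_with_ties := st.2.2
            if index == (vec.length : Int) - 1
                || !(PySem.List.pyGetD ((arg_sort_py vec).map (fun r => PySem.List.pyGetD vec r 0)) index 0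
                      == PySem.List.pyGetD ((arg_sort_py vec).map (fun r => PySem.List.pyGetD vec r 0)) (index + 1) 0) then
              let rv' := (PySem.List.pyRange (index - duplicate_count + 1) (index + 1)).foldl
                (fun rv j =>
                  PySem.List.pySetD rv (PySem.List.pyGetD (arg_sort_py vec) j 0)
                    (index + 1 - duplicate_count + 1)) rank_vector_with_ties
              ((0 : Int), (0 : Int), rv')
            else (sum_ranks, duplicate_count, rank_vector_with_ties)) st (kk : Int))
        ((0 : Int), (0 : Int), List.replicate vec.length (0 : Int))).2
      = ((k : Int) - (pvB (pvS vec) k : Int), pvRV (pvS vec) vec.length (pvB (pvS vec) k)) := by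
  induction k with
  | zero =>
    have hB0 : pvB (pvS vec) 0 = 0 := by
      unfold pvB
      split
      · next h => omega
      · exact pvR_zero _ (pvS_mono vec)
    simp [hB0, pvRV]
  | succ k ih =>
    have hkn : k < vec.length := by omega
    have hkS : k < (pvS vec).length := by rw [pvS_length]; omega
    have ihp := ih (by omega)
    have ihd := congrArg Prod.fst ihp
    have ihr := congrArg Prod.snd ihp
    simp only at ihd ihr
    have hBk : pvB (pvS vec) k = pvR (pvS vec) k := by
      unfold pvB
      rw [if_neg (by rw [pvS_length]; omega)]
    have ha : pvB (pvS vec) k ≤ k := by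
      rw [hBk]; exact pvR_le _ (pvS_mono vec) hkS
    rw [List.range_succ, List.foldl_append, List.foldl_cons, List.foldl_nil]
    by_cases hcase : k + 1 = vec.length ∨ pvV (pvS vec) k ≠ pvV (pvS vec) (k + 1)
    · -- a run ends at k: the inner loop writes the whole run
      have hcondtrue : (((k : Int) == (vec.length : Int) - 1)
          || !(PySem.List.pyGetD ((arg_sort_py vec).map (fun r => PySem.List.pyGetD vec r 0)) (↑k) 0
                == PySem.List.pyGetD ((arg_sort_py vec).map (fun r => PySem.List.pyGetD vec r 0)) ((↑k : Int) + 1) 0)) = true := by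
        by_cases hend : k + 1 = vec.length
        · have hc1 : ((k : Int) == (vec.length : Int) - 1) = true := by
            rw [beq_iff_eq]; omega
          rw [hc1, Bool.true_or]
        · have hne := hcase.resolve_left hend
          have hcast : ((k : Int) + 1) = (((k + 1 : Nat)) : Int) := by push_cast; ring
          have hk1 : k + 1 < vec.length := by omega
          have hc2 : (PySem.List.pyGetD ((arg_sort_py vec).map (fun r => PySem.List.pyGetD vec r 0)) (↑k) 0
                == PySem.List.pyGetD ((arg_sort_py vec).map (fun r => PySem.List.pyGetD vec r 0)) ((↑k : Int) + 1) 0) = false := by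
            rw [hcast, asv_getD vec hkn, asv_getD vec hk1, beq_eq_false_iff_ne]
            exact hne
          rw [hc2, Bool.not_false, Bool.or_true]
      have hB1 : pvB (pvS vec) (k + 1) = k + 1 := by
        by_cases hend : k + 1 = vec.length
        · unfold pvB
          rw [if_pos (by rw [pvS_length]; omega), pvS_length]
          omega
        · have hne := hcase.resolve_left hend
          unfold pvB
          rw [if_neg (by rw [pvS_length]; omega)]
          exact pvR_boundary _ (pvS_mono vec) (by rw [pvS_length]; omega) hne
      have hrun : ∀ j, pvB (pvS vec) k ≤ j → j ≤ k → pvR (pvS vec) j = pvB (pvS vec) k := by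
        intro j h1 h2
        rw [hBk] at h1 ⊢
        exact pvR_congr _ (pvR_run _ (pvS_mono vec) h1 h2 hkS)
      simp only [hcondtrue, ihd, ihr, if_true]
      have e1 : (k : Int) - ((↑k - (↑(pvB (pvS vec) k) : Int)) + 1) + 1 = ↑(pvB (pvS vec) k) := by ring
      have e2 : (k : Int) + 1 - ((↑k - (↑(pvB (pvS vec) k) : Int)) + 1) + 1 = (↑(pvB (pvS vec) k) : Int) + 1 := by ring
      simp only [e1, e2]
      rw [inner_eq vec ha hkn hrun, hB1]
      simp
    · -- still inside a run: only the counters move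
      push Not at hcase
      obtain ⟨hend, heq⟩ := hcase
      have hk1 : k + 1 < vec.length := by omega
      have hcondfalse : (((k : Int) == (vec.length : Int) - 1)
          || !(PySem.List.pyGetD ((arg_sort_py vec).map (fun r => PySem.List.pyGetD vec r 0)) (↑k) 0
                == PySem.List.pyGetD ((arg_sort_py vec).map (fun r => PySem.List.pyGetD vec r 0)) ((↑k : Int) + 1) 0)) = false := by
        have hc1 : ((k : Int) == (vec.length : Int) - 1) = false := by
          rw [beq_eq_false_iff_ne]
          intro h
          omega
        have hcast : ((k : Int) + 1) = (((k + 1 : Nat)) : Int) := by push_cast; ring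
        have hc2 : (PySem.List.pyGetD ((arg_sort_py vec).map (fun r => PySem.List.pyGetD vec r 0)) (↑k) 0
              == PySem.List.pyGetD ((arg_sort_py vec).map (fun r => PySem.List.pyGetD vec r 0)) ((↑k : Int) + 1) 0) = true := by
          rw [hcast, asv_getD vec hkn, asv_getD vec hk1, beq_iff_eq]
          exact heq
        rw [hc1, hc2, Bool.not_true, Bool.or_false]
      have hB1 : pvB (pvS vec) (k + 1) = pvB (pvS vec) k := by
        unfold pvB
        rw [if_neg (by rw [pvS_length]; omega), if_neg (by rw [pvS_length]; omega)]
        exact pvR_congr _ heq.symm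
      simp only [hcondfalse, ihd, ihr, if_false, Bool.false_eq_true]
      rw [hB1]
      refine Prod.ext ?_ rfl
      have hble : pvB (pvS vec) k ≤ k := ha
      simp only []
      push_cast
      omega


lemma pvRV_succ (s : List (Int × Int)) (n m : Nat) :
    pvRV s n (m + 1) = pvW s (pvRV s n m) m := by
  rw [pvRV, List.range_succ, List.foldl_append, List.foldl_cons, List.foldl_nil]
  rfl

lemma pvRV_length (s : List (Int × Int)) (n m : Nat) : (pvRV s n m).length = n := by
  induction m with
  | zero => simp [pvRV]
  | succ m ih => rw [pvRV_succ]; unfold pvW; rw [List.length_set]; exact ih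

lemma pvI_toNat_inj (vec : List Int) {i j : Nat} (hi : i < (pvS vec).length)
    (hj : j < (pvS vec).length) (hne : i ≠ j) :
    (pvI (pvS vec) i).toNat ≠ (pvI (pvS vec) j).toNat := by
  have hnd := pvS_snd_nodup vec
  have hil : i < ((pvS vec).map (fun p => p.2)).length := by simpa using hi
  have hjl : j < ((pvS vec).map (fun p => p.2)).length := by simpa using hj
  have hne2 : ((pvS vec).map (fun p => p.2))[i] ≠ ((pvS vec).map (fun p => p.2))[j] := by
    intro h
    exact hne (hnd.getElem_inj_iff.mp h)
  rw [List.getElem_map, List.getElem_map] at hne2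
  rw [← pvI_getElem _ hi, ← pvI_getElem _ hj] at hne2
  have hvi : i < vec.length := by rw [← pvS_length vec]; exact hi
  have hvj : j < vec.length := by rw [← pvS_length vec]; exact hj
  have h1 := (pvI_range vec hvi).1
  have h2 := (pvI_range vec hvj).1
  omega

lemma pvRV_get (vec : List Int) {m j : Nat} (hj : j < m) (hm : m ≤ vec.length) :
    (pvRV (pvS vec) vec.length m).getD (pvI (pvS vec) j).toNat 0 = (pvR (pvS vec) j : Int) + 1 := by
  induction m with
  | zero => omega
  | succ m ih =>
    rw [pvRV_succ]
    unfold pvW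
    rcases Nat.lt_or_ge j m with hjm | hjm
    · have hne : (pvI (pvS vec) m).toNat ≠ (pvI (pvS vec) j).toNat := by
        refine pvI_toNat_inj vec ?_ ?_ (by omega)
        · rw [pvS_length]; omega
        · rw [pvS_length]; omega
      rw [List.getD_eq_getElem?_getD, List.getElem?_set_ne hne, ← List.getD_eq_getElem?_getD]
      exact ih hjm (by omega)
    · have hjm' : j = m := by omega
      subst hjm'
      have hlt : (pvI (pvS vec) j).toNat < (pvRV (pvS vec) vec.length j).length := by
        rw [pvRV_length]
        exact (pvI_range vec (by omega)).2.1
      rw [List.getD_eq_getElem?_getD, List.getElem?_set_self hlt]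
      rfl

lemma final_eq (vec : List Int) :
    pvRV (pvS vec) vec.length vec.length = rank_data_py_alt vec := by
  have hlen := pvS_length vec
  apply List.ext_getElem
  · rw [pvRV_length]; simp [rank_data_py_alt]
  intro i h1 h2
  have hin : i < vec.length := by
    simpa [rank_data_py_alt] using h2
  have hi : ((i : Nat) : Int) ∈ (pvS vec).map (fun p => p.2) := by
    refine (pvS_snd_perm vec).mem_iff.mpr ?_
    exact List.mem_map.mpr ⟨i, List.mem_range.mpr hin, rfl⟩
  obtain ⟨p, hp, hpi⟩ := List.mem_map.mp hi
  obtain ⟨j, hjl, rfl⟩ := List.mem_iff_getElem.mp hp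
  have hj : pvI (pvS vec) j = (i : Int) := by rw [pvI_getElem _ hjl]; exact hpi
  have hjv : j < vec.length := by omega
  have htn : (pvI (pvS vec) j).toNat = i := by rw [hj]; exact Int.toNat_natCast i
  have hL : (pvRV (pvS vec) vec.length vec.length)[i] = (pvR (pvS vec) j : Int) + 1 := by
    have := pvRV_get vec (j := j) (m := vec.length) hjv (le_refl _)
    rw [htn] at this
    rw [List.getD_eq_getElem?_getD, List.getElem?_eq_getElem h1] at this
    simpa using this
  rw [hL]
  have hv : pvV (pvS vec) j = vec[i] := by
    obtain ⟨-, -, h3⟩ := pvI_range vec hjv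
    rw [h3, htn]
    simp [List.getD_eq_getElem?_getD, List.getElem?_eq_getElem hin]
  have hcount : pvR (pvS vec) j = vec.countP (fun u => decide (u < vec[i])) := by
    unfold pvR
    rw [hv]
    have h4 : ((pvS vec).map (fun p => p.1)).countP (fun u => decide (u < vec[i]))
        = (pvS vec).countP (fun p => decide (p.1 < vec[i])) := List.countP_map
    rw [← h4]
    exact ((pvS_fst_perm vec).countP_eq _)
  rw [hcount]
  simp [rank_data_py_alt]
  omega

-- ===== VERDICT (by name: the statement is the Claim_ definition above) =====
theorem rank_data_py_spec : Claim_equal_rank_data_py := by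
  intro vec _
  unfold Spec_rank_data_py
  have hport : rank_data_py vec
      = ((PySem.List.pyRange 0 (vec.length : Int)).foldl
          (fun (st : Int × Int × List Int) (index : Int) =>
            let sum_ranks := st.1 + index
            let duplicate_count := st.2.1 + 1
            let rank_vector_with_ties := st.2.2
            if index == (vec.length : Int) - 1
                || !(PySem.List.pyGetD ((arg_sort_py vec).map (fun r => PySem.List.pyGetD vec r 0)) index 0
                      == PySem.List.pyGetD ((arg_sort_py vec).map (fun r => PySem.List.pyGetD vec r 0)) (index + 1) 0) then
              let rv' := (PySem.List.pyRange (index - duplicate_count + 1) (index + 1)).foldl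
                (fun rv j =>
                  PySem.List.pySetD rv (PySem.List.pyGetD (arg_sort_py vec) j 0)
                    (index + 1 - duplicate_count + 1)) rank_vector_with_ties
              ((0 : Int), (0 : Int), rv')
            else (sum_ranks, duplicate_count, rank_vector_with_ties))
          ((0 : Int), (0 : Int), List.replicate vec.length (0 : Int))).2.2 := rfl
  rw [hport, PySem.List.pyRange_zero_natCast vec.length, List.foldl_map]
  have h := outer_inv vec vec.length (le_refl _)
  have hB : pvB (pvS vec) vec.length = vec.length := by
    unfold pvB
    rw [if_pos (pvS_length vec).symm]
    exact pvS_length vec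
  rw [hB] at h
  have h2 := congrArg Prod.snd h
  simp only at h2
  rw [h2]
  exact final_eq vec
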